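-- pv_equiv track=rewrite | github.com/tejoker/Unaite_summer_research | analysis/generate_comprehensive_summary.py | calculate_expected_windows
-- ===== SOURCE A (Python) =====
-- def calculate_expected_windows(start_row, end_row, window_size=100, stride=10):
--     """Calculate which windows should contain the anomaly"""
--     if start_row == 'N/A' or not isinstance(start_row, int):
--         return set()
--
--     # Adjust for differencing (lose first row)
--     diff_start = start_row - 1
--     diff_end = end_row - 1 if isinstance(end_row, int) and end_row != 'N/A' else diff_start
--
--     expected = set()
--     for w in range(0, 90):
--         w_start = w * stride
--         w_end = w_start + window_size - 1
--         if w_start <= diff_end and w_end >= diff_start: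
--             expected.add(w)
--
--     return expected
-- ===== SOURCE B (Python) =====
-- def calculate_expected_windows(start_row, end_row, window_size=100, stride=10):
--     """Windows overlapping the (differenced) anomaly rows form one contiguous
--     interval of indices; compute it directly with ceiling/floor division."""
--     if start_row == 'N/A' or not isinstance(start_row, int):
--         return set()
--     first = start_row - window_size           # lowest window start that still overlaps
--     last = (end_row - 1) if isinstance(end_row, int) else start_row - 1
--     lo = max(0, -(-first // stride))          # ceil(first / stride)
--     hi = min(89, last // stride)              # floor(last / stride)
--     return set(range(lo, hi + 1))
-- ===== Notes on version B (the rewrite author's own statement) =====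
-- stated objective: faster
-- what changed: Replaces the fixed scan over the 90 window indices with a closed-form computation of the contiguous overlapping interval via ceiling/floor division; Pre_ restricts to positive stride, the natural domain of a sliding-window stride, on which B's division is meaningful (B raises ZeroDivisionError at stride=0 and its interval formula does not apply to negative stride).
-- outside the precondition, e.g. on calculate_expected_windows(5, 10, 100, -10): A returns {0, 1, 2, 3, 4, 5, 6, 7, 8, 9}, B returns set()
import Mathlib
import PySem

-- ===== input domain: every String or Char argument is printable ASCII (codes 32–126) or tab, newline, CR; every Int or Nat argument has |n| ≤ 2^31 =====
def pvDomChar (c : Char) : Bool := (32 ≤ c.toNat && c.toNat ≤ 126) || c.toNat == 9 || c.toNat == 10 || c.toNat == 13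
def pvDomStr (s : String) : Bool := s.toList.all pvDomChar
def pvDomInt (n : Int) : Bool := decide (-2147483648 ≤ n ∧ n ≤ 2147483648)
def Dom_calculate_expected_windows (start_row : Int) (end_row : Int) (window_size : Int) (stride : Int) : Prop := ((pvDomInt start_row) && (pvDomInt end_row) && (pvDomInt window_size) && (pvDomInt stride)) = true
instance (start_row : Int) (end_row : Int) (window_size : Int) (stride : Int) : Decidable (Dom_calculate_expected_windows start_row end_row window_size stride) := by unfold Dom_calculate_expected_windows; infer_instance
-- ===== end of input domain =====

-- B replaces A's fixed scan over the 90 window indices by the closed-form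
-- contiguous interval computed with ceiling/floor division (objective: faster
-- by a constant factor); Pre_ restricts to positive stride, the natural domain.

-- ===== PORT A =====
-- start_row/end_row are Int here, so the 'N/A'/isinstance guards of the Python
-- are statically decided (the guard never fires, diff_end is always end_row - 1).
def calculate_expected_windows (start_row : Int) (end_row : Int) (window_size : Int) (stride : Int) : List Int :=
  let diff_start := start_row - 1
  let diff_end := end_row - 1
  let expected : PySem.Set Int := PySem.Set.empty
  (PySem.List.pyRange 0 90 1).foldl (fun expected w =>
    let w_start := w * stride
    let w_end := w_start + window_size - 1
    if w_start ≤ diff_end ∧ w_end ≥ diff_start then PySem.Set.add expected w else expected)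
    expected

-- ===== PORT B =====
def calculate_expected_windows_alt (start_row : Int) (end_row : Int) (window_size : Int) (stride : Int) : List Int :=
  let first := start_row - window_size
  let last := end_row - 1
  let lo := max 0 (-(PySem.Int.floordiv (-first) stride))
  let hi := min 89 (PySem.Int.floordiv last stride)
  PySem.Set.ofList (PySem.List.pyRange lo (hi + 1) 1)

-- ===== PRECONDITION & SPEC =====
-- Pre_ excludes non-positive stride, outside the natural domain of a sliding-window
-- stride: A's loop still returns values there, but B's closed-form divides by the
-- stride (ZeroDivisionError at stride = 0, and the interval formula assumes a
-- positive stride).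
def Pre_calculate_expected_windows (start_row : Int) (end_row : Int) (window_size : Int) (stride : Int) : Prop := 1 ≤ stride
instance (start_row : Int) (end_row : Int) (window_size : Int) (stride : Int) : Decidable (Pre_calculate_expected_windows start_row end_row window_size stride) := by unfold Pre_calculate_expected_windows; infer_instance
def pvWitness_calculate_expected_windows : Int × Int × Int × Int := (2, 5, 100, 10)
def Spec_calculate_expected_windows (start_row : Int) (end_row : Int) (window_size : Int) (stride : Int) (out : List Int) : Prop := out = calculate_expected_windows_alt start_row end_row window_size stride
instance (start_row : Int) (end_row : Int) (window_size : Int) (stride : Int) (out : List Int) : Decidable (Spec_calculate_expected_windows start_row end_row window_size stride out) := by unfold Spec_calculate_expected_windows; infer_instance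

-- ===== CLAIM =====
def Claim_equal_calculate_expected_windows : Prop := ∀ (start_row : Int) (end_row : Int) (window_size : Int) (stride : Int), Dom_calculate_expected_windows start_row end_row window_size stride → Pre_calculate_expected_windows start_row end_row window_size stride → Spec_calculate_expected_windows start_row end_row window_size stride (calculate_expected_windows start_row end_row window_size stride)

-- ===== LEMMAS AND PROOFS =====

-- A's loop, adding fresh elements to a set, is a filter.
theorem pv_foldl_set_add_filter (p : Int → Prop) [DecidablePred p] :
    ∀ (l : List Int) (s : PySem.Set Int), l.Nodup → (∀ x ∈ l, x ∉ s) →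
      l.foldl (fun s w => if p w then PySem.Set.add s w else s) s
        = s ++ l.filter (fun w => decide (p w)) := by
  intro l
  induction l with
  | nil => intro s _ _; simp
  | cons x xs ih =>
    intro s hnd hfresh
    simp only [List.foldl_cons, List.filter_cons]
    by_cases hp : p x
    · have hx : x ∉ s := hfresh x (by simp)
      have hadd : PySem.Set.add s x = s ++ [x] := by
        simp [PySem.Set.add, PySem.Set.contains_eq_listContains]
        intro h; exact absurd h hx
      rw [if_pos hp, hadd, ih (s ++ [x]) hnd.of_cons]
      · simp [hp]
      · intro y hy
        simp only [List.mem_append, List.mem_singleton]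
        rintro (h | rfl)
        · exact hfresh y (by simp [hy]) h
        · exact (List.nodup_cons.mp hnd).1 hy
    · rw [if_neg hp, ih s hnd.of_cons (fun y hy => hfresh y (by simp [hy]))]
      simp [hp]

theorem pv_A_eq_filter (start_row end_row window_size stride : Int) :
    calculate_expected_windows start_row end_row window_size stride
      = (PySem.List.pyRange 0 90 1).filter
          (fun w => decide (w * stride ≤ end_row - 1 ∧ w * stride + window_size - 1 ≥ start_row - 1)) :=
  calc calculate_expected_windows start_row end_row window_size stride
      = (PySem.List.pyRange 0 90 1).foldl
          (fun s w => if w * stride ≤ end_row - 1 ∧ w * stride + window_size - 1 ≥ start_row - 1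
                      then PySem.Set.add s w else s) PySem.Set.empty := rfl
    _ = _ := by
          rw [pv_foldl_set_add_filter _ _ _ (PySem.List.nodup_pyRange_one 0 90)
                (by intro x _ h; simp [PySem.Set.empty] at h)]
          simp [PySem.Set.empty]

theorem pv_le_floor_iff (b s w : Int) (hs : 0 < s) :
    w ≤ PySem.Int.floordiv b s ↔ w * s ≤ b :=
  PySem.Int.le_floordiv_iff_mul_le hs

theorem pv_neg_floordiv_le_iff (x s w : Int) (hs : 0 < s) :
    -(PySem.Int.floordiv x s) ≤ w ↔ -x ≤ w * s := by
  constructor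
  · intro h
    have := (pv_le_floor_iff x s (-w) hs).mp (by omega)
    nlinarith
  · intro h
    have := (pv_le_floor_iff x s (-w) hs).mpr (by nlinarith)
    omega

theorem pv_filter_eq_range (n lo hi : Int) (p : Int → Prop) [DecidablePred p]
    (hmem : ∀ w, 0 ≤ w → w < n → (p w ↔ lo ≤ w ∧ w ≤ hi))
    (hlo : 0 ≤ lo) (hhi : hi < n) :
    (PySem.List.pyRange 0 n 1).filter (fun w => decide (p w))
      = PySem.List.pyRange lo (hi + 1) 1 := by
  have h1 : ((PySem.List.pyRange 0 n 1).filter (fun w => decide (p w))).Nodup :=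
    (PySem.List.nodup_pyRange_one 0 n).filter _
  have h2 := PySem.List.nodup_pyRange_one lo (hi + 1)
  have hperm : ((PySem.List.pyRange 0 n 1).filter (fun w => decide (p w))).Perm
      (PySem.List.pyRange lo (hi + 1) 1) := by
    rw [List.perm_ext_iff_of_nodup h1 h2]
    intro x
    simp only [List.mem_filter, PySem.List.mem_pyRange_one, decide_eq_true_eq]
    constructor
    · rintro ⟨⟨hx0, hxn⟩, hp⟩
      have := (hmem x hx0 hxn).mp hp
      omega
    · rintro ⟨hx1, hx2⟩
      exact ⟨⟨by omega, by omega⟩, (hmem x (by omega) (by omega)).mpr ⟨by omega, by omega⟩⟩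
  exact List.Perm.eq_of_pairwise (fun a b _ _ h1 h2 => absurd h1 (by omega))
    ((PySem.List.pairwise_lt_pyRange_one 0 n).filter _)
    (PySem.List.pairwise_lt_pyRange_one lo (hi + 1)) hperm

-- ===== VERDICT =====
theorem calculate_expected_windows_spec : Claim_equal_calculate_expected_windows := by
  intro start_row end_row window_size stride _ hpre
  have hpos : (0 : Int) < stride := hpre
  unfold Spec_calculate_expected_windows
  rw [pv_A_eq_filter]
  unfold calculate_expected_windows_alt
  set a := start_row - window_size with ha
  set b := end_row - 1 with hb
  rw [PySem.Set.ofList_eq_self_of_nodup _ (PySem.List.nodup_pyRange_one _ _)]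
  apply pv_filter_eq_range
  · intro w hw0 _
    have c1 := pv_neg_floordiv_le_iff (-a) stride w hpos
    have c2 := pv_le_floor_iff b stride w hpos
    constructor
    · rintro ⟨h1, h2⟩
      exact ⟨max_le hw0 (c1.mpr (by nlinarith)), le_min (by omega) (c2.mpr (by omega))⟩
    · rintro ⟨h1, h2⟩
      have h1' := c1.mp (le_trans (le_max_right _ _) h1)
      have h2' := c2.mp (le_trans h2 (min_le_right _ _))
      constructor
      · omega
      · nlinarith
  · exact le_max_left _ _
  · have := min_le_left 89 (PySem.Int.floordiv b stride); omega
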